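-- pv_equiv track=rewrite | github.com/WellnestScribe/WellnestScribe | apps/emr/services/scribe_import.py | _detect_encounter_type
-- ===== SOURCE A (Python) =====
-- def _detect_encounter_type(full_text: str, active_conditions: str) -> str:
--     lowered = full_text.lower()
--     condition_keys = {item.strip().lower() for item in (active_conditions or "").split(",") if item.strip()}
--     if any(word in lowered for word in ["antenatal", "pregnancy", "prenatal"]):
--         return "antenatal"
--     if any(word in lowered for word in ["immunization", "immunisation", "vaccine", "vaccination"]):
--         return "immunisation"
--     if any(word in lowered for word in ["well child", "routine child", "growth check"]):
--         return "well_child"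
--     if any(word in lowered for word in ["home visit", "visited at home"]):
--         return "home_visit"
--     if any(word in lowered for word in ["telehealth", "phone consult", "video visit"]):
--         return "telehealth"
--     if any(word in lowered for word in ["follow up", "follow-up", "bp review", "review visit"]) or condition_keys:
--         if any(key in condition_keys for key in {"htn", "dm", "lipids", "asthma", "ckd"}):
--             return "chronic_followup"
--     return ""
-- ===== SOURCE B (Python) =====
-- _KEYWORD_LABEL = {
--     "antenatal": "antenatal", "pregnancy": "antenatal", "prenatal": "antenatal",
--     "immunization": "immunisation", "immunisation": "immunisation",
--     "vaccine": "immunisation", "vaccination": "immunisation",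
--     "well child": "well_child", "routine child": "well_child", "growth check": "well_child",
--     "home visit": "home_visit", "visited at home": "home_visit",
--     "telehealth": "telehealth", "phone consult": "telehealth", "video visit": "telehealth",
-- }
--
-- _PRIORITY = {"antenatal": 0, "immunisation": 1, "well_child": 2, "home_visit": 3, "telehealth": 4}
--
-- _CHRONIC = {"htn", "dm", "lipids", "asthma", "ckd"}
--
--
-- def _detect_encounter_type(full_text: str, active_conditions: str) -> str:
--     lowered = full_text.lower()
--     matched = [label for kw, label in _KEYWORD_LABEL.items() if kw in lowered]
--     if matched:
--         return min(matched, key=_PRIORITY.__getitem__)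
--     if any(item.strip().lower() in _CHRONIC for item in (active_conditions or "").split(",")):
--         return "chronic_followup"
--     return ""
-- ===== Notes on version B (the rewrite author's own statement) =====
-- stated objective: alternative
-- what changed: Replaces A's sequential short-circuiting if-chain with a collect-then-reduce pass: a flat keyword-to-label map produces the list of ALL matched labels, and min() with a priority key picks the result; the chronic branch becomes a single any() pass over the raw comma-split items tested directly against the chronic set, with no intermediate key set and no redundant follow-up/nonempty guard.
import Mathlib
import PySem

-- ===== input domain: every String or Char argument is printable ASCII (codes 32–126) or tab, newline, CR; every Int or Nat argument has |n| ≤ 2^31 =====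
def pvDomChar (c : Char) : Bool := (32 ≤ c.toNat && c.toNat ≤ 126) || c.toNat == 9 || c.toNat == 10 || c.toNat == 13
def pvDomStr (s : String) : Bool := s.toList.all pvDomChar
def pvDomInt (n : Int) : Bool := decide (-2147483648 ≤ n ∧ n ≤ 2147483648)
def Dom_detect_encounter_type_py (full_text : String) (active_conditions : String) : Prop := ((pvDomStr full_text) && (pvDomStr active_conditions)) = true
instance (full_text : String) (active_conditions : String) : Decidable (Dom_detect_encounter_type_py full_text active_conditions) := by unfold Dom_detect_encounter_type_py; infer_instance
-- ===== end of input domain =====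

-- B replaces A's short-circuiting if-chain by collect-all-matched-labels + min-by-priority,
-- and the chronic guard/key-set by one any() pass over the raw split items (objective: alternative).

-- ===== PORT A =====
def detect_encounter_type_py (full_text : String) (active_conditions : String) : String :=
  let lowered := PySem.Str.lower full_text
  let condition_keys : PySem.Set String :=
    PySem.Set.ofList
      ((((PySem.Str.split? (if active_conditions == "" then "" else active_conditions) ",").getD []).filter
          (fun item => !(PySem.Str.strip item == ""))).map
        (fun item => PySem.Str.lower (PySem.Str.strip item)))
  if ["antenatal", "pregnancy", "prenatal"].any (fun word => PySem.Str.isIn word lowered) then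
    "antenatal"
  else if ["immunization", "immunisation", "vaccine", "vaccination"].any (fun word => PySem.Str.isIn word lowered) then
    "immunisation"
  else if ["well child", "routine child", "growth check"].any (fun word => PySem.Str.isIn word lowered) then
    "well_child"
  else if ["home visit", "visited at home"].any (fun word => PySem.Str.isIn word lowered) then
    "home_visit"
  else if ["telehealth", "phone consult", "video visit"].any (fun word => PySem.Str.isIn word lowered) then
    "telehealth"
  else if (["follow up", "follow-up", "bp review", "review visit"].any (fun word => PySem.Str.isIn word lowered)
            || !condition_keys.isEmpty) then
    -- Python's inner 'any' iterates a literal set; 'any' is order-independent, iterated in literal order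
    if ["htn", "dm", "lipids", "asthma", "ckd"].any (fun key => PySem.Set.contains condition_keys key) then
      "chronic_followup"
    else ""
  else ""

-- ===== PORT B =====
-- _KEYWORD_LABEL dict as an insertion-ordered association list (its .items() order)
def pvKw : List (String × String) :=
  [("antenatal", "antenatal"), ("pregnancy", "antenatal"), ("prenatal", "antenatal"),
   ("immunization", "immunisation"), ("immunisation", "immunisation"),
   ("vaccine", "immunisation"), ("vaccination", "immunisation"),
   ("well child", "well_child"), ("routine child", "well_child"), ("growth check", "well_child"),
   ("home visit", "home_visit"), ("visited at home", "home_visit"),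
   ("telehealth", "telehealth"), ("phone consult", "telehealth"), ("video visit", "telehealth")]

def pvPriority : PySem.Dict String Int :=
  PySem.Dict.ofList
    [("antenatal", 0), ("immunisation", 1), ("well_child", 2), ("home_visit", 3), ("telehealth", 4)]

def pvChronic : PySem.Set String := PySem.Set.ofList ["htn", "dm", "lipids", "asthma", "ckd"]

def detect_encounter_type_py_alt (full_text : String) (active_conditions : String) : String :=
  let lowered := PySem.Str.lower full_text
  let matched := (pvKw.filter (fun kv => PySem.Str.isIn kv.1 lowered)).map (fun kv => kv.2)
  if !matched.isEmpty then
    -- min(matched, key=_PRIORITY.__getitem__): every matched label is a key of pvPriority and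
    -- matched is nonempty here, so neither __getitem__'s KeyError nor min's ValueError can fire;
    -- getD 0 / getD "" are exact on this branch
    (PySem.List.min? matched (fun lab => PySem.Dict.getD pvPriority lab 0)).getD ""
  else if (((PySem.Str.split? (if active_conditions == "" then "" else active_conditions) ",").getD []).any
            (fun item => PySem.Set.contains pvChronic (PySem.Str.lower (PySem.Str.strip item)))) then
    "chronic_followup"
  else ""

-- ===== PRECONDITION & SPEC =====
def Spec_detect_encounter_type_py (full_text : String) (active_conditions : String) (out : String) : Prop := out = detect_encounter_type_py_alt full_text active_conditions
instance (full_text : String) (active_conditions : String) (out : String) : Decidable (Spec_detect_encounter_type_py full_text active_conditions out) := by unfold Spec_detect_encounter_type_py; infer_instance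

-- ===== CLAIM (what is proved, stated in full; the proofs are below) =====
def Claim_equal_detect_encounter_type_py : Prop := ∀ (full_text : String) (active_conditions : String), Dom_detect_encounter_type_py full_text active_conditions → Spec_detect_encounter_type_py full_text active_conditions (detect_encounter_type_py full_text active_conditions)

-- ===== LEMMAS AND PROOFS =====

-- A's keyword if-chain as an Option, over the 15 individual keyword-hit booleans
def chainOpt (b1 b2 b3 b4 b5 b6 b7 b8 b9 b10 b11 b12 b13 b14 b15 : Bool) : Option String :=
  if b1 || (b2 || (b3 || false)) then some "antenatal"
  else if b4 || (b5 || (b6 || (b7 || false))) then some "immunisation"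
  else if b8 || (b9 || (b10 || false)) then some "well_child"
  else if b11 || (b12 || false) then some "home_visit"
  else if b13 || (b14 || (b15 || false)) then some "telehealth"
  else none

-- the chain equals min-by-priority over the labels of the hit keywords (all 2^15 hit patterns)
set_option maxHeartbeats 4000000 in
lemma chain_min : ∀ (b1 b2 b3 b4 b5 b6 b7 b8 b9 b10 b11 b12 b13 b14 b15 : Bool),
    chainOpt b1 b2 b3 b4 b5 b6 b7 b8 b9 b10 b11 b12 b13 b14 b15
      = PySem.List.min?
          (((pvKw.zip [b1,b2,b3,b4,b5,b6,b7,b8,b9,b10,b11,b12,b13,b14,b15]).filter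
              (fun q => q.2)).map (fun q => q.1.2))
          (fun lab => PySem.Dict.getD pvPriority lab 0) := by
  decide

-- a filter-map rewritten through zipping with the list of test results
lemma filter_map_zip {α β : Type} (l : List (α × β)) (p : α × β → Bool) :
    (l.filter p).map (fun kv => kv.2)
      = ((l.zip (l.map p)).filter (fun q => q.2)).map (fun q => q.1.2) := by
  induction l with
  | nil => rfl
  | cons a t ih =>
    simp only [List.map_cons, List.zip_cons_cons, List.filter_cons]
    cases hp : p a <;> simp [ih]

-- A's chronic branch (guard + key-set membership chain) equals B's single any() over the split items
lemma chronic_eq (g : Bool) (items : List String) :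
    (if (g || !(PySem.Set.ofList
          ((items.filter (fun item => !(PySem.Str.strip item == ""))).map
            (fun item => PySem.Str.lower (PySem.Str.strip item)))).isEmpty) then
      (if ["htn", "dm", "lipids", "asthma", "ckd"].any
            (fun key => PySem.Set.contains
              (PySem.Set.ofList
                ((items.filter (fun item => !(PySem.Str.strip item == ""))).map
                  (fun item => PySem.Str.lower (PySem.Str.strip item)))) key) then
        "chronic_followup"
      else "")
    else "")
    = (if items.any (fun item => PySem.Set.contains pvChronic (PySem.Str.lower (PySem.Str.strip item))) then
        "chronic_followup"
      else "") := by
  cases hr : items.any (fun item => PySem.Set.contains pvChronic (PySem.Str.lower (PySem.Str.strip item))) with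
  | false =>
    -- no split item maps into the chronic set, so A's inner membership chain is false too
    have hin : (["htn", "dm", "lipids", "asthma", "ckd"].any
        (fun key => PySem.Set.contains
          (PySem.Set.ofList
            ((items.filter (fun item => !(PySem.Str.strip item == ""))).map
              (fun item => PySem.Str.lower (PySem.Str.strip item)))) key)) = false := by
      rw [List.any_eq_false]
      intro k hk
      simp only [PySem.Set.contains_iff, PySem.Set.mem_ofList, List.mem_map, List.mem_filter]
      rintro ⟨item, ⟨hmem, _⟩, hkey⟩
      refine (List.any_eq_false.mp hr) item hmem ?_
      rw [hkey, PySem.Set.contains_iff]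
      simp only [pvChronic, PySem.Set.mem_ofList]
      exact hk
    rw [hin]
    cases (g || _) <;> simp
  | true =>
    obtain ⟨item, hmem, hc⟩ := List.any_eq_true.mp hr
    have hck : PySem.Str.lower (PySem.Str.strip item) ∈ (["htn", "dm", "lipids", "asthma", "ckd"] : List String) := by
      have h2 := (PySem.Set.contains_iff _ _).mp hc
      simp only [pvChronic, PySem.Set.mem_ofList] at h2
      exact h2
    have hne : ¬(PySem.Str.strip item == "") = true := by
      intro h
      rw [eq_of_beq h] at hck
      revert hck
      decide
    have hkeymem : PySem.Str.lower (PySem.Str.strip item) ∈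
        PySem.Set.ofList
          ((items.filter (fun item => !(PySem.Str.strip item == ""))).map
            (fun item => PySem.Str.lower (PySem.Str.strip item))) := by
      rw [PySem.Set.mem_ofList]
      exact List.mem_map.mpr ⟨item, List.mem_filter.mpr ⟨hmem, by simpa using hne⟩, rfl⟩
    have hempty : (PySem.Set.ofList
        ((items.filter (fun item => !(PySem.Str.strip item == ""))).map
          (fun item => PySem.Str.lower (PySem.Str.strip item)))).isEmpty = false := by
      rw [List.isEmpty_eq_false_iff]
      exact List.ne_nil_of_mem hkeymem
    have hin : (["htn", "dm", "lipids", "asthma", "ckd"].any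
        (fun key => PySem.Set.contains
          (PySem.Set.ofList
            ((items.filter (fun item => !(PySem.Str.strip item == ""))).map
              (fun item => PySem.Str.lower (PySem.Str.strip item)))) key)) = true := by
      rw [List.any_eq_true]
      exact ⟨PySem.Str.lower (PySem.Str.strip item), hck, (PySem.Set.contains_iff _ _).mpr hkeymem⟩
    rw [hempty, hin]
    cases g <;> rfl

-- the two function bodies agree for any lowered text and any split item list
lemma bodies_eq (lowered : String) (items : List String) :
    (if ["antenatal", "pregnancy", "prenatal"].any (fun word => PySem.Str.isIn word lowered) then
      "antenatal"
    else if ["immunization", "immunisation", "vaccine", "vaccination"].any (fun word => PySem.Str.isIn word lowered) then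
      "immunisation"
    else if ["well child", "routine child", "growth check"].any (fun word => PySem.Str.isIn word lowered) then
      "well_child"
    else if ["home visit", "visited at home"].any (fun word => PySem.Str.isIn word lowered) then
      "home_visit"
    else if ["telehealth", "phone consult", "video visit"].any (fun word => PySem.Str.isIn word lowered) then
      "telehealth"
    else if (["follow up", "follow-up", "bp review", "review visit"].any (fun word => PySem.Str.isIn word lowered)
              || !(PySem.Set.ofList
                    ((items.filter (fun item => !(PySem.Str.strip item == ""))).map
                      (fun item => PySem.Str.lower (PySem.Str.strip item)))).isEmpty) then
      if ["htn", "dm", "lipids", "asthma", "ckd"].any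
            (fun key => PySem.Set.contains
              (PySem.Set.ofList
                ((items.filter (fun item => !(PySem.Str.strip item == ""))).map
                  (fun item => PySem.Str.lower (PySem.Str.strip item)))) key) then
        "chronic_followup"
      else ""
    else "")
    = (let matched := (pvKw.filter (fun kv => PySem.Str.isIn kv.1 lowered)).map (fun kv => kv.2)
       if !matched.isEmpty then
        (PySem.List.min? matched (fun lab => PySem.Dict.getD pvPriority lab 0)).getD ""
       else if items.any (fun item => PySem.Set.contains pvChronic (PySem.Str.lower (PySem.Str.strip item))) then
        "chronic_followup"
       else "") := by
  have hbs : pvKw.map (fun kv => PySem.Str.isIn kv.1 lowered)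
      = [PySem.Str.isIn "antenatal" lowered, PySem.Str.isIn "pregnancy" lowered,
         PySem.Str.isIn "prenatal" lowered, PySem.Str.isIn "immunization" lowered,
         PySem.Str.isIn "immunisation" lowered, PySem.Str.isIn "vaccine" lowered,
         PySem.Str.isIn "vaccination" lowered, PySem.Str.isIn "well child" lowered,
         PySem.Str.isIn "routine child" lowered, PySem.Str.isIn "growth check" lowered,
         PySem.Str.isIn "home visit" lowered, PySem.Str.isIn "visited at home" lowered,
         PySem.Str.isIn "telehealth" lowered, PySem.Str.isIn "phone consult" lowered,
         PySem.Str.isIn "video visit" lowered] := rfl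
  have hmin := chain_min (PySem.Str.isIn "antenatal" lowered) (PySem.Str.isIn "pregnancy" lowered)
    (PySem.Str.isIn "prenatal" lowered) (PySem.Str.isIn "immunization" lowered)
    (PySem.Str.isIn "immunisation" lowered) (PySem.Str.isIn "vaccine" lowered)
    (PySem.Str.isIn "vaccination" lowered) (PySem.Str.isIn "well child" lowered)
    (PySem.Str.isIn "routine child" lowered) (PySem.Str.isIn "growth check" lowered)
    (PySem.Str.isIn "home visit" lowered) (PySem.Str.isIn "visited at home" lowered)
    (PySem.Str.isIn "telehealth" lowered) (PySem.Str.isIn "phone consult" lowered)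
    (PySem.Str.isIn "video visit" lowered)
  rw [← hbs, ← filter_map_zip pvKw (fun kv => PySem.Str.isIn kv.1 lowered)] at hmin
  -- A's five keyword branches are exactly chainOpt at those booleans
  have hA : (if ["antenatal", "pregnancy", "prenatal"].any (fun word => PySem.Str.isIn word lowered) then
      ("antenatal" : String)
    else if ["immunization", "immunisation", "vaccine", "vaccination"].any (fun word => PySem.Str.isIn word lowered) then
      "immunisation"
    else if ["well child", "routine child", "growth check"].any (fun word => PySem.Str.isIn word lowered) then
      "well_child"
    else if ["home visit", "visited at home"].any (fun word => PySem.Str.isIn word lowered) then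
      "home_visit"
    else if ["telehealth", "phone consult", "video visit"].any (fun word => PySem.Str.isIn word lowered) then
      "telehealth"
    else if (["follow up", "follow-up", "bp review", "review visit"].any (fun word => PySem.Str.isIn word lowered)
              || !(PySem.Set.ofList
                    ((items.filter (fun item => !(PySem.Str.strip item == ""))).map
                      (fun item => PySem.Str.lower (PySem.Str.strip item)))).isEmpty) then
      if ["htn", "dm", "lipids", "asthma", "ckd"].any
            (fun key => PySem.Set.contains
              (PySem.Set.ofList
                ((items.filter (fun item => !(PySem.Str.strip item == ""))).map
                  (fun item => PySem.Str.lower (PySem.Str.strip item)))) key) then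
        "chronic_followup"
      else ""
    else "")
    = (match chainOpt (PySem.Str.isIn "antenatal" lowered) (PySem.Str.isIn "pregnancy" lowered)
        (PySem.Str.isIn "prenatal" lowered) (PySem.Str.isIn "immunization" lowered)
        (PySem.Str.isIn "immunisation" lowered) (PySem.Str.isIn "vaccine" lowered)
        (PySem.Str.isIn "vaccination" lowered) (PySem.Str.isIn "well child" lowered)
        (PySem.Str.isIn "routine child" lowered) (PySem.Str.isIn "growth check" lowered)
        (PySem.Str.isIn "home visit" lowered) (PySem.Str.isIn "visited at home" lowered)
        (PySem.Str.isIn "telehealth" lowered) (PySem.Str.isIn "phone consult" lowered)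
        (PySem.Str.isIn "video visit" lowered) with
      | some s => s
      | none =>
        (if (["follow up", "follow-up", "bp review", "review visit"].any (fun word => PySem.Str.isIn word lowered)
              || !(PySem.Set.ofList
                    ((items.filter (fun item => !(PySem.Str.strip item == ""))).map
                      (fun item => PySem.Str.lower (PySem.Str.strip item)))).isEmpty) then
          if ["htn", "dm", "lipids", "asthma", "ckd"].any
                (fun key => PySem.Set.contains
                  (PySem.Set.ofList
                    ((items.filter (fun item => !(PySem.Str.strip item == ""))).map
                      (fun item => PySem.Str.lower (PySem.Str.strip item)))) key) then
            "chronic_followup"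
          else ""
        else "")) := by
    unfold chainOpt
    simp only [List.any_cons, List.any_nil]
    split_ifs <;> rfl
  rw [hA]
  cases hc : chainOpt (PySem.Str.isIn "antenatal" lowered) (PySem.Str.isIn "pregnancy" lowered)
      (PySem.Str.isIn "prenatal" lowered) (PySem.Str.isIn "immunization" lowered)
      (PySem.Str.isIn "immunisation" lowered) (PySem.Str.isIn "vaccine" lowered)
      (PySem.Str.isIn "vaccination" lowered) (PySem.Str.isIn "well child" lowered)
      (PySem.Str.isIn "routine child" lowered) (PySem.Str.isIn "growth check" lowered)
      (PySem.Str.isIn "home visit" lowered) (PySem.Str.isIn "visited at home" lowered)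
      (PySem.Str.isIn "telehealth" lowered) (PySem.Str.isIn "phone consult" lowered)
      (PySem.Str.isIn "video visit" lowered) with
  | none =>
    rw [hc] at hmin
    have hm : (pvKw.filter (fun kv => PySem.Str.isIn kv.1 lowered)).map (fun kv => kv.2) = [] :=
      (PySem.List.min?_eq_none_iff _ _).mp hmin.symm
    simp only [hm, List.isEmpty_nil, Bool.not_true, if_neg (by simp : ¬(false = true))]
    exact chronic_eq _ items
  | some s =>
    rw [hc] at hmin
    have hne : (pvKw.filter (fun kv => PySem.Str.isIn kv.1 lowered)).map (fun kv => kv.2) ≠ [] := by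
      intro h
      rw [h] at hmin
      simp [PySem.List.min?] at hmin
    have hE : ((pvKw.filter (fun kv => PySem.Str.isIn kv.1 lowered)).map (fun kv => kv.2)).isEmpty = false :=
      List.isEmpty_eq_false_iff.mpr hne
    show s = (if (!((pvKw.filter (fun kv => PySem.Str.isIn kv.1 lowered)).map (fun kv => kv.2)).isEmpty) = true then
        (PySem.List.min? ((pvKw.filter (fun kv => PySem.Str.isIn kv.1 lowered)).map (fun kv => kv.2))
          (fun lab => PySem.Dict.getD pvPriority lab 0)).getD ""
      else if (items.any fun item => PySem.Set.contains pvChronic (PySem.Str.lower (PySem.Str.strip item))) = true then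
        "chronic_followup"
      else "")
    rw [hE, ← hmin]
    norm_num

-- ===== VERDICT (by name: the statement is the Claim_ definition above) =====
theorem detect_encounter_type_py_spec : Claim_equal_detect_encounter_type_py := by
  intro full_text active_conditions _
  unfold Spec_detect_encounter_type_py detect_encounter_type_py detect_encounter_type_py_alt
  exact bodies_eq (PySem.Str.lower full_text)
    ((PySem.Str.split? (if active_conditions == "" then "" else active_conditions) ",").getD [])
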